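-- pv_equiv track=rewrite | github.com/mangodan2003/meta-mediapipe-cmake | recipes-framework/mediapipe/files/bazel_to_cmake/mediapipe_bazel_to_cmake.py | replace_deps
-- ===== SOURCE A (Python) =====
-- def replace_suffix(string, old, new):
--     """Returns a string with an old suffix replaced by a new suffix."""
--     return string.endswith(old) and string[:-len(old)] + new or string
--
-- def replace_deps(deps, old, new, drop_google_protobuf = True):
--     """Returns deps with an old suffix replaced by a new suffix.
--
--     Args:
--       deps: the specified dep targets.
--       old: the suffix to remove.
--       new: the suffix to insert.
--       drop_google_protobuf: if true, omit google/protobuf deps.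
--     Returns:
--       the modified dep targets.
--     """
--     if deps == None:
--         return deps
--
--     if drop_google_protobuf:
--         deps = [dep for dep in deps if not dep.startswith("@com_google_protobuf//")]
--     deps = [replace_suffix(dep, "any_proto", "cc_wkt_protos") for dep in deps]
--
--     deps = [dep for dep in deps if not dep.endswith("_annotations")]
--     deps = [replace_suffix(dep, old, new) for dep in deps]
--     return deps
-- ===== SOURCE B (Python) =====
-- def _convert(dep, old, new, drop_google_protobuf):
--     """Maps one dep target to its rewritten form, or None if it is dropped."""
--     if drop_google_protobuf and dep.startswith("@com_google_protobuf//"):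
--         return None
--     if dep.endswith("any_proto"):
--         dep = dep[:len(dep) - len("any_proto")] + "cc_wkt_protos"
--     if dep.endswith("_annotations"):
--         return None
--     if dep.endswith(old):
--         dep = dep[:len(dep) - len(old)] + new
--     return dep
--
--
-- def replace_deps(deps, old, new, drop_google_protobuf=True):
--     if deps is None:
--         return None
--     return [d for d in (_convert(dep, old, new, drop_google_protobuf) for dep in deps)
--             if d is not None]
-- ===== Notes on version B (the rewrite author's own statement) =====
-- stated objective: simpler
-- what changed: Replaces the four staged list comprehensions and the and/or suffix-replace idiom with one Option-returning per-element classifier applied in a single pass (None = dropped), using plain conditional suffix rewriting.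
-- intended difference: When old is '' (A's s[:-0] slice wrongly empties the whole string so A returns just new, or the unchanged dep when new is '') or when new is '' and a surviving dep equals old (A's and/or idiom sees the falsy '' and returns the dep unreplaced), A returns those accidental values while B performs the plain suffix replacement (dep+new resp. ''), which is the intended suffix-replace semantics. — e.g. on replace_deps(some ["a"], "a", "", true): A returns some ["a"], B returns some [""]
import Mathlib
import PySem

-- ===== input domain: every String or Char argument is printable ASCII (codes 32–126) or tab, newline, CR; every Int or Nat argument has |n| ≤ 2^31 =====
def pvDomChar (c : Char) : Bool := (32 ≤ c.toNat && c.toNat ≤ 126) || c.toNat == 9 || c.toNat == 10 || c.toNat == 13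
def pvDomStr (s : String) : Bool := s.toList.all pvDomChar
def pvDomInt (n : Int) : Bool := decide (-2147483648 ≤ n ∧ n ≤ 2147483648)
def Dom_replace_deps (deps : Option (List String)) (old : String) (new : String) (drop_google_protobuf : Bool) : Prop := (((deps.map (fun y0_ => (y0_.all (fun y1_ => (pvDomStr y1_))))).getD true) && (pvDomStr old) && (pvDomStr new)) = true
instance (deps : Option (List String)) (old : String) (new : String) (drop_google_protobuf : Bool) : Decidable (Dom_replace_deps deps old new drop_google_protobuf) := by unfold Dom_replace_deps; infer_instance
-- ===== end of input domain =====

-- B maps each dep through one Option-valued classifier in a single pass (None = dropped), with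
-- plain conditional suffix rewriting; A's four staged comprehensions and its and/or idiom give
-- accidental values when old or new is '' (see D_ below), where B does the plain suffix replace.

-- ===== PORT A =====
-- replace_suffix(string, old, new) = string.endswith(old) and string[:-len(old)] + new or string
-- ('x and y or z' = if x truthy then (y if y truthy else z) else z); on List Char (ASCII-exact).
def replace_suffix (s old new : List Char) : List Char :=
  if PySem.Chars.endswith s old &&
     decide (PySem.Chars.slice s none (some (-(old.length : Int))) ++ new ≠ []) then
    PySem.Chars.slice s none (some (-(old.length : Int))) ++ new
  else s

def replace_deps (deps : Option (List String)) (old : String) (new : String) (drop_google_protobuf : Bool) : Option (List String) :=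
  match deps with
  | none => none
  | some ds =>
    let ds0 : List (List Char) := ds.map String.toList
    let ds1 := if drop_google_protobuf then
        ds0.filter (fun dep => !PySem.Chars.startswith dep "@com_google_protobuf//".toList)
      else ds0
    let ds2 := ds1.map (fun dep => replace_suffix dep "any_proto".toList "cc_wkt_protos".toList)
    let ds3 := ds2.filter (fun dep => !PySem.Chars.endswith dep "_annotations".toList)
    let ds4 := ds3.map (fun dep => replace_suffix dep old.toList new.toList)
    some (ds4.map String.ofList)

-- ===== PORT B =====
-- Source B's _convert: one Option-valued classifier per dep (none = dropped); the suffix rewrites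
-- are dep[:len(dep)-len(suf)] + repl, ported as slice to the nonnegative index len(dep)-len(suf).
def convertB (dep old new : List Char) (drop_google_protobuf : Bool) : Option (List Char) :=
  if drop_google_protobuf && PySem.Chars.startswith dep "@com_google_protobuf//".toList then
    none
  else
    let d := if PySem.Chars.endswith dep "any_proto".toList then
        PySem.Chars.slice dep none (some ((dep.length : Int) - ("any_proto".toList.length : Int)))
          ++ "cc_wkt_protos".toList
      else dep
    if PySem.Chars.endswith d "_annotations".toList then none
    else if PySem.Chars.endswith d old then
      some (PySem.Chars.slice d none (some ((d.length : Int) - (old.length : Int))) ++ new)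
    else some d

-- Source B's single comprehension over the generator = one filterMap pass.
def replace_deps_alt (deps : Option (List String)) (old : String) (new : String) (drop_google_protobuf : Bool) : Option (List String) :=
  match deps with
  | none => none
  | some ds =>
    some (((ds.map String.toList).filterMap
            (fun dep => convertB dep old.toList new.toList drop_google_protobuf)).map String.ofList)

-- ===== PRECONDITION & SPEC =====
-- On deps that survive A's drop/annotations filters, A and B differ exactly when old = '' with
-- new ≠ '' and the dep nonempty (A's s[:-0] empties the string, so A yields just new where B
-- yields dep+new), or when new = '' and the dep (after the any_proto step) equals old (A's
-- and/or idiom returns the dep unreplaced where B yields ''); B's value is the plain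
-- suffix-replace semantics intended here.
def dElem (dep old new : String) (drop : Bool) : Bool :=
  !(drop && PySem.Str.startswith dep "@com_google_protobuf//") &&
  (let d := if PySem.Str.endswith dep "any_proto" then
      String.ofList (dep.toList.rdrop 9) ++ "cc_wkt_protos" else dep
   !PySem.Str.endswith d "_annotations" &&
   old.isEmpty != new.isEmpty && ((d == old) != old.isEmpty))

def D_replace_deps (deps : Option (List String)) (old : String) (new : String) (drop_google_protobuf : Bool) : Prop :=
  (deps.getD []).any (dElem · old new drop_google_protobuf) = true
instance (deps : Option (List String)) (old : String) (new : String) (drop_google_protobuf : Bool) : Decidable (D_replace_deps deps old new drop_google_protobuf) := by unfold D_replace_deps; infer_instance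

def Spec_replace_deps (deps : Option (List String)) (old : String) (new : String) (drop_google_protobuf : Bool) (out : Option (List String)) : Prop := ¬ D_replace_deps deps old new drop_google_protobuf → out = replace_deps_alt deps old new drop_google_protobuf
instance (deps : Option (List String)) (old : String) (new : String) (drop_google_protobuf : Bool) (out : Option (List String)) : Decidable (Spec_replace_deps deps old new drop_google_protobuf out) := by unfold Spec_replace_deps; infer_instance

def pvDiffWitness_replace_deps : Option (List String) × String × String × Bool := (some ["a"], "a", "", true)
def pvDiffWitnessOut_replace_deps : (Option (List String)) × (Option (List String)) := (some ["a"], some [""])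

-- ===== CLAIM =====
def Claim_unchanged_replace_deps : Prop := ∀ (deps : Option (List String)) (old : String) (new : String) (drop_google_protobuf : Bool), Dom_replace_deps deps old new drop_google_protobuf → Spec_replace_deps deps old new drop_google_protobuf (replace_deps deps old new drop_google_protobuf)
def Claim_changed_replace_deps : Prop := Dom_replace_deps (pvDiffWitness_replace_deps.1) (pvDiffWitness_replace_deps.2.1) (pvDiffWitness_replace_deps.2.2.1) (pvDiffWitness_replace_deps.2.2.2) ∧ D_replace_deps (pvDiffWitness_replace_deps.1) (pvDiffWitness_replace_deps.2.1) (pvDiffWitness_replace_deps.2.2.1) (pvDiffWitness_replace_deps.2.2.2) ∧ replace_deps (pvDiffWitness_replace_deps.1) (pvDiffWitness_replace_deps.2.1) (pvDiffWitness_replace_deps.2.2.1) (pvDiffWitness_replace_deps.2.2.2) = pvDiffWitnessOut_replace_deps.1 ∧ replace_deps_alt (pvDiffWitness_replace_deps.1) (pvDiffWitness_replace_deps.2.1) (pvDiffWitness_replace_deps.2.2.1) (pvDiffWitness_replace_deps.2.2.2) = pvDiffWitnessOut_replace_deps.2 ∧ pvDiffWitnessOut_replace_deps.1 ≠ pvD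iffWitnessOut_replace_deps.2

def Claim_exact_replace_deps : Prop := ∀ (deps : Option (List String)) (old : String) (new : String) (drop_google_protobuf : Bool), Dom_replace_deps deps old new drop_google_protobuf → D_replace_deps deps old new drop_google_protobuf → replace_deps deps old new drop_google_protobuf ≠ replace_deps_alt deps old new drop_google_protobuf

-- ===== LEMMAS AND PROOFS =====
-- proof-side restatement of dElem as a flat disjunction, plus the bridge lemma
def dElemP (dep old new : List Char) (drop : Bool) : Bool :=
  !(drop && PySem.Chars.startswith dep "@com_google_protobuf//".toList) &&
  ( (decide (old = []) && decide (new ≠ []) && decide (dep ≠ []) &&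
     (PySem.Chars.endswith dep "any_proto".toList ||
      !PySem.Chars.endswith dep "_annotations".toList))
  || (decide (old ≠ []) && decide (new = []) &&
      !PySem.Chars.endswith old "_annotations".toList &&
      ((PySem.Chars.endswith dep "any_proto".toList &&
        decide (dep.take (dep.length - 9) ++ "cc_wkt_protos".toList = old))
       || (!PySem.Chars.endswith dep "any_proto".toList && decide (dep = old)))) )

-- '_annotations' is never a suffix of anything ending in 'cc_wkt_protos'
theorem not_ann_suffix (t : List Char) :
    ¬ ("_annotations".toList <:+ t ++ "cc_wkt_protos".toList) := by
  rw [List.suffix_iff_eq_drop]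
  intro he
  have hlen : (t ++ "cc_wkt_protos".toList).length = t.length + 13 := by simp
  have h12 : ("_annotations".toList).length = 12 := rfl
  rw [h12, hlen, show t.length + 13 - 12 = t.length + 1 from by omega, List.drop_append,
    List.drop_eq_nil_of_le (by omega), show t.length + 1 - t.length = 1 from by omega] at he
  exact absurd he (by decide)

theorem ann_of_app_cc (t : List Char) :
    PySem.Chars.endswith (t ++ "cc_wkt_protos".toList) "_annotations".toList = false := by
  rw [Bool.eq_false_iff]
  intro hc
  exact not_ann_suffix t ((PySem.Chars.endswith_iff _ _).mp hc)

-- list-level restatement of dElem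
def dElemC (dep old new : List Char) (drop : Bool) : Bool :=
  !(drop && PySem.Chars.startswith dep "@com_google_protobuf//".toList) &&
  (let d := if PySem.Chars.endswith dep "any_proto".toList then
      dep.take (dep.length - 9) ++ "cc_wkt_protos".toList else dep
   !PySem.Chars.endswith d "_annotations".toList &&
   ((old == []) != (new == [])) && ((d == old) != (old == [])))

theorem beq_toList (s t : String) : (s == t) = (s.toList == t.toList) := by
  apply Bool.eq_iff_iff.mpr
  simp [String.toList_inj]

theorem isEmpty_toList (t : String) : t.toList.isEmpty = t.isEmpty := by
  apply Bool.eq_iff_iff.mpr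
  rw [List.isEmpty_iff, String.isEmpty_iff, String.toList_eq_nil_iff]

theorem dElem_eq_C (dep old new : String) (drop : Bool) :
    dElem dep old new drop = dElemC dep.toList old.toList new.toList drop := by
  unfold dElem dElemC
  by_cases hAP : PySem.Chars.endswith dep.toList ['a','n','y','_','p','r','o','t','o'] <;>
    simp [hAP, List.rdrop, beq_toList, String.toList_append, isEmpty_toList]

theorem dElemC_eq_P (dep old new : List Char) (drop : Bool) :
    dElemC dep old new drop = dElemP dep old new drop := by
  unfold dElemC dElemP
  apply Bool.eq_iff_iff.mpr
  by_cases hAP : PySem.Chars.endswith dep ['a','n','y','_','p','r','o','t','o']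
  · have hdp : dep ≠ [] := by rintro rfl; exact absurd hAP (by decide)
    have ha : PySem.Chars.endswith
        (List.take (dep.length - 9) dep ++ ['c','c','_','w','k','t','_','p','r','o','t','o','s'])
        ['_','a','n','n','o','t','a','t','i','o','n','s'] = false := ann_of_app_cc _
    by_cases h1 : old = []
    · subst h1
      by_cases h2 : new = [] <;> simp [hAP, h2, hdp, ha]
    · have hie : old.isEmpty = false := by simpa [List.isEmpty_iff] using h1
      by_cases h2 : new = [] <;> simp [hAP, h1, h2, hie, ha, beq_iff_eq] <;>
        exact fun _ hq => hq ▸ ha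
  · by_cases h1 : old = []
    · subst h1
      by_cases h2 : new = [] <;> simp [hAP, h2] <;> tauto
    · have hie : old.isEmpty = false := by simpa [List.isEmpty_iff] using h1
      by_cases h2 : new = [] <;> simp [hAP, h1, h2, hie, beq_iff_eq] <;> tauto

theorem dElem_eq (dep old new : String) (drop : Bool) :
    dElem dep old new drop = dElemP dep.toList old.toList new.toList drop :=
  (dElem_eq_C dep old new drop).trans (dElemC_eq_P dep.toList old.toList new.toList drop)

-- A's per-element classifier (proof device): A's four-stage pipeline is filterMap of this.
def convA (dep old new : List Char) (drop : Bool) : Option (List Char) :=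
  if drop && PySem.Chars.startswith dep "@com_google_protobuf//".toList then none
  else
    let d := replace_suffix dep "any_proto".toList "cc_wkt_protos".toList
    if PySem.Chars.endswith d "_annotations".toList then none
    else some (replace_suffix d old new)

theorem chainA (old new : List Char) (drop : Bool) : ∀ l : List (List Char),
    ((((if drop then
          l.filter (fun dep => !PySem.Chars.startswith dep "@com_google_protobuf//".toList)
        else l).map
          (fun dep => replace_suffix dep "any_proto".toList "cc_wkt_protos".toList)).filter
        (fun dep => !PySem.Chars.endswith dep "_annotations".toList)).map
      (fun dep => replace_suffix dep old new)) =
    l.filterMap (fun dep => convA dep old new drop) := by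
  intro l
  induction l with
  | nil => cases drop <;> simp
  | cons x xs ih =>
    cases drop <;>
      by_cases h1 : PySem.Chars.startswith x "@com_google_protobuf//".toList <;>
      by_cases h2 : PySem.Chars.endswith
          (replace_suffix x "any_proto".toList "cc_wkt_protos".toList) "_annotations".toList <;>
      simp_all [convA]

theorem inner_eq (dep : List Char) :
    replace_suffix dep "any_proto".toList "cc_wkt_protos".toList =
      (if PySem.Chars.endswith dep "any_proto".toList then
        PySem.Chars.slice dep none (some ((dep.length : Int) - ("any_proto".toList.length : Int)))
          ++ "cc_wkt_protos".toList
      else dep) := by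
  unfold replace_suffix
  by_cases hew : PySem.Chars.endswith dep "any_proto".toList
  · have hs : ("any_proto".toList) <:+ dep := (PySem.Chars.endswith_iff _ _).mp hew
    have hlen : 9 ≤ dep.length := hs.length_le
    have h9 : ("any_proto".toList.length) = 9 := rfl
    simp only [hew, h9, Bool.true_and, PySem.Chars.slice_eq_listSlice]
    rw [PySem.List.slice_to_neg_natCast dep 9 (by omega)]
    have e : ((dep.length:Int) - ((9 : Nat):Int)) = (((dep.length - 9 : Nat)):Int) := by omega
    rw [e, PySem.List.slice_to_natCast]
    simp
  · simp only [Bool.not_eq_true] at hew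
    have hew' : PySem.Chars.endswith dep ['a','n','y','_','p','r','o','t','o'] = false := hew
    simp [hew']

theorem dElemP_L1 (dep old new : List Char) (drop : Bool)
    (hk : (drop && PySem.Chars.startswith dep "@com_google_protobuf//".toList) = false)
    (h1 : old = []) (h2 : new ≠ []) (h3 : dep ≠ [])
    (h4 : PySem.Chars.endswith dep "any_proto".toList = true ∨
          PySem.Chars.endswith dep "_annotations".toList = false) :
    dElemP dep old new drop = true := by
  simp [dElemP, h1, h2, h3]
  simp at hk h4
  refine ⟨?_, ?_⟩
  · cases drop with
    | false => exact Or.inl rfl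
    | true => exact Or.inr (hk rfl)
  · rcases h4 with h4 | h4
    · exact Or.inl h4
    · exact Or.inr h4

theorem dElemP_L2 (dep old new : List Char) (drop : Bool)
    (hk : (drop && PySem.Chars.startswith dep "@com_google_protobuf//".toList) = false)
    (h1 : old ≠ []) (h2 : new = [])
    (h3 : PySem.Chars.endswith old "_annotations".toList = false)
    (h4 : (PySem.Chars.endswith dep "any_proto".toList = true ∧
           dep.take (dep.length - 9) ++ "cc_wkt_protos".toList = old) ∨
          (PySem.Chars.endswith dep "any_proto".toList = false ∧ dep = old)) :
    dElemP dep old new drop = true := by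
  simp [dElemP, h1, h2]
  simp at hk h3 h4
  refine ⟨?_, ?_, ?_⟩
  · cases drop with
    | false => exact Or.inl rfl
    | true => exact Or.inr (hk rfl)
  · exact h3
  · tauto

theorem pointwise (dep old new : List Char) (drop : Bool)
    (h : dElemP dep old new drop = false) :
    convA dep old new drop = convertB dep old new drop := by
  unfold convA convertB
  by_cases hk : drop && PySem.Chars.startswith dep "@com_google_protobuf//".toList
  · rw [if_pos hk, if_pos hk]
  · have hk' : (drop && PySem.Chars.startswith dep "@com_google_protobuf//".toList) = false := by
      simpa using hk
    rw [if_neg hk, if_neg hk]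
    rw [inner_eq]
    set d := (if PySem.Chars.endswith dep "any_proto".toList then
        PySem.Chars.slice dep none (some ((dep.length : Int) - ("any_proto".toList.length : Int)))
          ++ "cc_wkt_protos".toList
      else dep) with hd
    by_cases hann : PySem.Chars.endswith d "_annotations".toList
    · rw [if_pos hann, if_pos hann]
    · have hann' : PySem.Chars.endswith d "_annotations".toList = false := by simpa using hann
      rw [if_neg hann, if_neg hann]
      by_cases hew : PySem.Chars.endswith d old
      · have hs : old <:+ d := (PySem.Chars.endswith_iff _ _).mp hew
        have hlen : old.length ≤ d.length := hs.length_le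
        have hslice : PySem.Chars.slice d none (some ((d.length : Int) - (old.length : Int)))
            = List.take (d.length - old.length) d := by
          have e : ((d.length:Int) - (old.length:Int)) = (((d.length - old.length : Nat)):Int) := by omega
          simp only [PySem.Chars.slice_eq_listSlice, e, PySem.List.slice_to_natCast]
        rw [if_pos hew, hslice]
        rcases eq_or_ne old [] with hold | hold
        · -- old = []: A's slice s[:-0] is s[:0] = []
          subst hold
          have hz0 : PySem.Chars.slice d none (some (-((([]:List Char)).length : Int))) = [] := by
            rw [PySem.Chars.slice_eq_listSlice,
              show (-(((([]:List Char)).length:Int))) = ((0:Nat):Int) from rfl,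
              PySem.List.slice_to_natCast]
            exact List.take_zero
          simp only [List.length_nil, Nat.sub_zero, List.take_length]
          unfold replace_suffix
          rw [hz0]
          rcases eq_or_ne new [] with hnew | hnew
          · subst hnew; simp [hew]
          · -- dElemP false forces dep = [] (hence d = [])
            have hdep : dep = [] := by
              by_contra hne
              have h4 : PySem.Chars.endswith dep "any_proto".toList = true ∨
                  PySem.Chars.endswith dep "_annotations".toList = false := by
                by_cases hap : PySem.Chars.endswith dep "any_proto".toList
                · exact Or.inl hap
                · refine Or.inr ?_
                  rw [hd, if_neg hap] at hann'
                  exact hann'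
              have := dElemP_L1 dep [] new drop hk' rfl hnew hne h4
              rw [this] at h; cases h
            have hdnil : d = [] := by rw [hd, hdep]; rfl
            rw [hdnil]
            simp [hnew]
            decide
        · -- old ≠ []
          have holdpos : 0 < old.length := List.length_pos_iff.mpr hold
          have hsneg : PySem.Chars.slice d none (some (-(old.length : Int)))
              = List.take (d.length - old.length) d := by
            rw [PySem.Chars.slice_eq_listSlice, PySem.List.slice_to_neg_natCast d old.length holdpos]
          unfold replace_suffix
          rw [hsneg]
          by_cases hx : List.take (d.length - old.length) d ++ new = []
          · exfalso
            have hnew : new = [] := (List.append_eq_nil_iff.mp hx).2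
            have htake : List.take (d.length - old.length) d = [] := (List.append_eq_nil_iff.mp hx).1
            have hdne : d ≠ [] := by
              intro hdn; rw [hdn] at hs
              exact hold (List.suffix_nil.mp hs)
            have hlen2 : old.length = d.length := by
              rcases List.take_eq_nil_iff.mp htake with h0 | h0
              · omega
              · exact absurd h0 hdne
            have hdo : old = d := hs.eq_of_length hlen2
            have hannsO : PySem.Chars.endswith old "_annotations".toList = false := by
              rw [hdo]; exact hann'
            by_cases hAP : PySem.Chars.endswith dep "any_proto".toList
            · have hsAP : "any_proto".toList <:+ dep := (PySem.Chars.endswith_iff _ _).mp hAP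
              have h9 : 9 ≤ dep.length := hsAP.length_le
              have hdform : d = dep.take (dep.length - 9) ++ "cc_wkt_protos".toList := by
                rw [hd, if_pos hAP]
                congr 1
                have e : ((dep.length:Int) - (("any_proto".toList.length):Int))
                    = (((dep.length - 9 : Nat)):Int) := by
                  simp only [show ("any_proto".toList.length) = 9 from rfl]; omega
                rw [PySem.Chars.slice_eq_listSlice, e, PySem.List.slice_to_natCast]
              have := dElemP_L2 dep old new drop hk' hold hnew hannsO
                (Or.inl ⟨hAP, (hdo.trans hdform).symm⟩)
              rw [this] at h; cases h
            · have hAP' : PySem.Chars.endswith dep "any_proto".toList = false := by simpa using hAP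
              have hddep : d = dep := by rw [hd, if_neg hAP]
              have := dElemP_L2 dep old new drop hk' hold hnew hannsO
                (Or.inr ⟨hAP', by rw [hdo, hddep]⟩)
              rw [this] at h; cases h
          · have hcond : (PySem.Chars.endswith d old &&
                decide (List.take (d.length - old.length) d ++ new ≠ [])) = true := by
              simp [hew, hx]
            rw [if_pos hcond]
      · -- ¬ endswith: both return d
        have hew' : PySem.Chars.endswith d old = false := by simpa using hew
        rw [if_neg hew]
        unfold replace_suffix
        simp [hew']

theorem main_eq (deps : Option (List String)) (old new : String) (drop : Bool)
    (hD : ¬ D_replace_deps deps old new drop) :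
    replace_deps deps old new drop = replace_deps_alt deps old new drop := by
  cases deps with
  | none => rfl
  | some ds =>
    unfold replace_deps replace_deps_alt
    simp only [chainA]
    congr 1
    congr 1
    apply List.filterMap_congr
    intro x hx
    obtain ⟨dep, hdep, rfl⟩ := List.mem_map.mp hx
    apply pointwise
    have hany : (ds.any (fun dep => dElemP dep.toList old.toList new.toList drop)) = false := by
      unfold D_replace_deps at hD
      simpa [dElem_eq] using hD
    have := List.any_eq_false.mp hany
    simpa using this dep hdep

-- the two classifiers drop exactly the same elements
theorem conv_none_iff (dep old new : List Char) (drop : Bool) :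
    (convA dep old new drop = none ↔ convertB dep old new drop = none) := by
  unfold convA convertB
  rw [inner_eq]
  by_cases hk : drop && PySem.Chars.startswith dep "@com_google_protobuf//".toList
  · rw [if_pos hk, if_pos hk]
  · rw [if_neg hk, if_neg hk]
    by_cases hann : PySem.Chars.endswith
        (if PySem.Chars.endswith dep "any_proto".toList then
          PySem.Chars.slice dep none (some ((dep.length : Int) - ("any_proto".toList.length : Int)))
            ++ "cc_wkt_protos".toList
        else dep) "_annotations".toList
    · rw [if_pos hann, if_pos hann]
    · rw [if_neg hann, if_neg hann]
      by_cases hew : PySem.Chars.endswith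
          (if PySem.Chars.endswith dep "any_proto".toList then
            PySem.Chars.slice dep none (some ((dep.length : Int) - ("any_proto".toList.length : Int)))
              ++ "cc_wkt_protos".toList
          else dep) old
      · rw [if_pos hew]; simp
      · rw [if_neg hew]; simp

-- where dElemP holds, the classifiers return different values
theorem pointwise_ne (dep old new : List Char) (drop : Bool)
    (h : dElemP dep old new drop = true) :
    convA dep old new drop ≠ convertB dep old new drop := by
  unfold dElemP at h
  rw [Bool.and_eq_true] at h
  obtain ⟨hA, hBC⟩ := h
  rw [Bool.not_eq_eq_eq_not, Bool.not_true] at hA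
  unfold convA convertB
  rw [inner_eq]
  have hkneg : ¬((drop && PySem.Chars.startswith dep "@com_google_protobuf//".toList) = true) := by
    simp only [hA]; simp
  rw [if_neg hkneg, if_neg hkneg]
  set d := (if PySem.Chars.endswith dep "any_proto".toList then
      PySem.Chars.slice dep none (some ((dep.length : Int) - ("any_proto".toList.length : Int)))
        ++ "cc_wkt_protos".toList
    else dep) with hd
  rw [Bool.or_eq_true] at hBC
  rcases hBC with h1 | h2
  · -- old = [], new ≠ [], dep ≠ []
    simp only [Bool.and_eq_true, decide_eq_true_eq, Bool.not_eq_eq_eq_not, Bool.not_true,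
      Bool.or_eq_true] at h1
    obtain ⟨⟨⟨ho, hn⟩, hdp⟩, hnAP⟩ := h1
    subst ho
    have hdne : d ≠ [] := by
      rw [hd]; split_ifs
      · simp
      · exact hdp
    have hannF : PySem.Chars.endswith d "_annotations".toList = false := by
      rw [hd]
      by_cases hAP : PySem.Chars.endswith dep "any_proto".toList
      · rw [if_pos hAP]
        rw [Bool.eq_false_iff]
        intro hc
        exact not_ann_suffix _ ((PySem.Chars.endswith_iff _ _).mp hc)
      · rw [if_neg hAP]
        rcases hnAP with hc | hc
        · exact absurd (by simpa using hc) hAP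
        · exact hc
    have hannneg : ¬(PySem.Chars.endswith d "_annotations".toList = true) := by
      simp only [hannF]; simp
    rw [if_neg hannneg, if_neg hannneg]
    have hewd : PySem.Chars.endswith d [] = true :=
      (PySem.Chars.endswith_iff _ _).mpr List.nil_suffix
    have hz0 : PySem.Chars.slice d none (some (-((([]:List Char)).length : Int))) = [] := by
      rw [PySem.Chars.slice_eq_listSlice,
        show (-(((([]:List Char)).length:Int))) = ((0:Nat):Int) from rfl,
        PySem.List.slice_to_natCast]
      exact List.take_zero
    have hzfull : PySem.Chars.slice d none (some ((d.length : Int) - ((([]:List Char)).length : Int)))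
        = d := by
      rw [PySem.Chars.slice_eq_listSlice,
        show ((d.length:Int) - ((([]:List Char)).length:Int)) = ((d.length:Nat):Int) from by
          simp, PySem.List.slice_to_natCast]
      exact List.take_length
    rw [if_pos hewd]
    unfold replace_suffix
    rw [hz0, hzfull, hewd]
    simp only [Bool.true_and, List.nil_append]
    rw [if_pos (by simpa using hn)]
    intro hc
    rw [Option.some_inj] at hc
    have := congrArg List.length hc
    simp at this
    exact hdne this
  · -- old ≠ [], new = [], element equals old after the any_proto step
    simp only [Bool.and_eq_true, decide_eq_true_eq, Bool.not_eq_eq_eq_not, Bool.not_true,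
      Bool.or_eq_true] at h2
    obtain ⟨⟨⟨ho, hn⟩, hoANN⟩, hdisj⟩ := h2
    subst hn
    have h13 : ("cc_wkt_protos".toList).length = 13 := rfl
    have hdo : d = old := by
      rw [hd]
      rcases hdisj with ⟨hAP, holdform⟩ | ⟨hAP, hdeq⟩
      · rw [if_pos hAP]
        have hsAP : "any_proto".toList <:+ dep := (PySem.Chars.endswith_iff _ _).mp hAP
        have h9 : 9 ≤ dep.length := hsAP.length_le
        have e : ((dep.length:Int) - (("any_proto".toList.length):Int))
            = (((dep.length - 9 : Nat)):Int) := by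
          simp only [show ("any_proto".toList.length) = 9 from rfl]; omega
        rw [PySem.Chars.slice_eq_listSlice, e, PySem.List.slice_to_natCast]
        exact holdform
      · rw [if_neg (by simp only [hAP]; simp)]
        exact hdeq
    have hannneg : ¬(PySem.Chars.endswith d "_annotations".toList = true) := by
      rw [hdo]; simp only [hoANN]; simp
    rw [if_neg hannneg, if_neg hannneg]
    have hewd : PySem.Chars.endswith d old = true := by
      rw [hdo]
      exact (PySem.Chars.endswith_iff _ _).mpr (List.suffix_refl old)
    rw [if_pos hewd]
    have hx0 : PySem.Chars.slice d none (some (-(old.length : Int)))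
        = List.take (d.length - old.length) d := by
      rw [PySem.Chars.slice_eq_listSlice,
        PySem.List.slice_to_neg_natCast d old.length (List.length_pos_iff.mpr ho)]
    have htk : List.take (d.length - old.length) d = [] := by
      rw [hdo, Nat.sub_self]; exact List.take_zero
    have hfull : PySem.Chars.slice d none (some ((d.length : Int) - (old.length : Int)))
        = [] := by
      rw [PySem.Chars.slice_eq_listSlice,
        show ((d.length:Int) - (old.length:Int)) = (((d.length - old.length : Nat)):Int) from by
          rw [hdo]; omega,
        PySem.List.slice_to_natCast, htk]
    unfold replace_suffix
    rw [hx0, htk, hfull]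
    simp only [List.append_nil, hewd, Bool.true_and]
    rw [if_neg (by simp)]
    rw [hdo]
    intro hc
    rw [Option.some_inj] at hc
    exact ho hc

-- two filterMaps with the same kept-set differ as soon as one kept element differs
theorem filterMap_ne {α β : Type} (f g : α → Option β) :
    ∀ l : List α, (∀ x, (f x = none ↔ g x = none)) →
      (∃ x ∈ l, f x ≠ g x) → l.filterMap f ≠ l.filterMap g := by
  intro l hnone
  induction l with
  | nil => rintro ⟨x, hx, -⟩; cases hx
  | cons a l ih =>
    rintro ⟨x, hx, hne⟩
    rw [List.filterMap_cons, List.filterMap_cons]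
    cases hfa : f a with
    | none =>
      rw [(hnone a).mp hfa]
      rcases List.mem_cons.mp hx with rfl | hxl
      · exact absurd (hfa.trans ((hnone x).mp hfa).symm) hne
      · exact ih ⟨x, hxl, hne⟩
    | some b =>
      have hga : g a ≠ none := fun hg => by rw [(hnone a).mpr hg] at hfa; cases hfa
      cases hgav : g a with
      | none => exact absurd hgav hga
      | some c =>
        rcases List.mem_cons.mp hx with rfl | hxl
        · intro hc
          injection hc with h1 h2
          exact hne (by rw [hfa, hgav, h1])
        · intro hc
          injection hc with h1 h2
          exact ih ⟨x, hxl, hne⟩ h2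

-- ===== VERDICT =====
theorem replace_deps_spec : Claim_unchanged_replace_deps := by
  intro deps old new drop _ hD
  exact main_eq deps old new drop hD

theorem replace_deps_changed : Claim_changed_replace_deps := by
  unfold Claim_changed_replace_deps; decide

theorem replace_deps_tight : Claim_exact_replace_deps := by
  intro deps old new drop _ hD
  unfold D_replace_deps at hD
  cases deps with
  | none => exact absurd hD (Bool.false_ne_true)
  | some ds =>
    simp only [List.any_eq_true] at hD
    obtain ⟨dep, hdep, hel⟩ := hD
    rw [dElem_eq] at hel
    unfold replace_deps replace_deps_alt
    simp only [chainA]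
    intro hc
    rw [Option.some_inj] at hc
    have hLAB : ds.filterMap (fun x => convA x.toList old.toList new.toList drop) =
        ds.filterMap (fun x => convertB x.toList old.toList new.toList drop) := by
      have h2 := congrArg (List.map String.toList) hc
      simpa [Function.comp_def] using h2
    exact filterMap_ne _ _ ds
      (fun x => conv_none_iff x.toList old.toList new.toList drop)
      ⟨dep, hdep, pointwise_ne _ _ _ _ hel⟩ hLAB
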